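-- pv_equiv track=rewrite | github.com/vishrutkmr7/DailyPracticeProblemsDIP | 2022/12 December/db12222022.py | specialValues
-- ===== SOURCE A (Python) =====
-- def specialValues(matrix: list[list[int]]) -> list[int]:
--     special_values = []
--     for item in matrix:
--         special_values.extend(
--             item[column]
--             for column in range(len(item))
--             if item[column] == min(item)
--             and item[column] == max(matrix[i][column] for i in range(len(matrix)))
--         )
--     return special_values
-- ===== SOURCE B (Python) =====
-- def specialValues(matrix: list[list[int]]) -> list[int]:
--     row_min = [min(row, default=0) for row in matrix]
--     width = max((len(row) for row in matrix), default=0)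
--     col_max = [max((row[c] for row in matrix if len(row) > c), default=0) for c in range(width)]
--     out = []
--     for row, m in zip(matrix, row_min):
--         for c, v in enumerate(row):
--             if v == m and v == col_max[c]:
--                 out.append(v)
--     return out
-- ===== Notes on version B (the rewrite author's own statement) =====
-- stated objective: faster
-- what changed: B precomputes all row minima and per-column maxima once and then does a single O(R*C) scan, instead of A recomputing min(row) and the whole column maximum inside the inner loop (O(R*C*(R+C))).
import Mathlib
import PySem

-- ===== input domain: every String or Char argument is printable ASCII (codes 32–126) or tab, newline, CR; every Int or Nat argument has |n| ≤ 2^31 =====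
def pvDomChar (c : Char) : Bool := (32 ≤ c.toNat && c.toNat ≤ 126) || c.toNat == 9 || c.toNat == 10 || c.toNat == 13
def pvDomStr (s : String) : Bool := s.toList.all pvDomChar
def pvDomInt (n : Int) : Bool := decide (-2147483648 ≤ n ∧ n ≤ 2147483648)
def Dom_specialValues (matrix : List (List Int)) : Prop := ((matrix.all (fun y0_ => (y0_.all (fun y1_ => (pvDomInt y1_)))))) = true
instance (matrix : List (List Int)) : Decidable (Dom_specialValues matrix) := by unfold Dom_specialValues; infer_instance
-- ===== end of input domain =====

-- B precomputes all row minima and column maxima once and then makes a single scan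
-- (O(R*C) instead of A's min/max recomputation inside the inner loop); return values are equal on Pre_.

-- ===== PORT A =====
-- literal transliteration of A: for each row, extend by the entries that equal the row min and the column max.
-- pyGetD defaults are exact here: every index evaluated under Pre_ is in range, min/max run on nonempty lists.
def specialValues (matrix : List (List Int)) : List Int :=
  matrix.foldl (fun special_values item =>
    special_values ++
      (PySem.List.pyRange 0 (item.length : Int) 1).flatMap (fun column =>
        if PySem.List.pyGetD item column 0 = (PySem.List.min? item (fun x => x)).getD 0 ∧
           PySem.List.pyGetD item column 0 =
             (PySem.List.max? ((PySem.List.pyRange 0 (matrix.length : Int) 1).map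
                (fun i => PySem.List.pyGetD (PySem.List.pyGetD matrix i []) column 0)) (fun x => x)).getD 0
        then [PySem.List.pyGetD item column 0] else []))
    []

-- ===== PORT B =====
-- transliteration of Source B: precomputed row minima (min(row, default=0)), matrix width,
-- per-column maxima over the rows long enough, then one nested scan with list lookups only.
def specialValues_alt (matrix : List (List Int)) : List Int :=
  let rowMin := matrix.map (fun row => PySem.List.minD row (fun x => x) 0)
  let width : Int := PySem.List.maxD (matrix.map (fun row => (row.length : Int))) (fun x => x) 0
  let colMax := (PySem.List.pyRange 0 width 1).map (fun c =>
    PySem.List.maxD ((matrix.filter (fun row => decide (c < (row.length : Int)))).map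
      (fun row => PySem.List.pyGetD row c 0)) (fun x => x) 0)
  (matrix.zip rowMin).foldl (fun (out : List Int) (rm : List Int × Int) =>
    (PySem.List.enumerate rm.1).foldl (fun (out : List Int) (cv : Int × Int) =>
      if cv.2 = rm.2 ∧ cv.2 = PySem.List.pyGetD colMax cv.1 0 then out ++ [cv.2] else out) out) []

-- ===== PRECONDITION & SPEC =====
-- Pre_ excludes exactly the inputs on which A raises IndexError: a ragged matrix in which some row's
-- minimal entry sits in a column that a shorter row does not have (there A's column-max generator
-- indexes past the short row's end).  On every other input A returns normally.
def Pre_specialValues (matrix : List (List Int)) : Prop :=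
  ∀ row ∈ matrix, ∀ c < row.length, (∀ x ∈ row, row.getD c 0 ≤ x) → ∀ row' ∈ matrix, c < row'.length
instance (matrix : List (List Int)) : Decidable (Pre_specialValues matrix) := by
  unfold Pre_specialValues; infer_instance
def pvWitness_specialValues : List (List Int) := [[1, 2], [3, 4]]

def Spec_specialValues (matrix : List (List Int)) (out : List Int) : Prop := out = specialValues_alt matrix
instance (matrix : List (List Int)) (out : List Int) : Decidable (Spec_specialValues matrix out) := by unfold Spec_specialValues; infer_instance

-- ===== CLAIM (what is proved, stated in full; the proofs are below) =====
def Claim_equal_specialValues : Prop := ∀ (matrix : List (List Int)), Dom_specialValues matrix → Pre_specialValues matrix → Spec_specialValues matrix (specialValues matrix)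

-- ===== LEMMAS AND PROOFS =====

-- a comprehension with a filter clause is a filter-then-map
theorem pv_flatMap_ite_singleton {α β : Type} (l : List α) (p : α → Prop) [DecidablePred p] (f : α → β) :
    l.flatMap (fun x => if p x then [f x] else []) = (l.filter (fun x => decide (p x))).map f := by
  induction l with
  | nil => rfl
  | cons h t ih => by_cases hp : p h <;> simp [hp, ih]

-- on Pre_, when row[j] is the row minimum, A's column maximum (over all rows) equals B's
-- precomputed colMax[j] (over the rows long enough): Pre_ makes every row long enough at j.
theorem pv_row (matrix : List (List Int)) (hpre : Pre_specialValues matrix)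
    (row : List Int) (hrow : row ∈ matrix) (j : Int) (h0 : 0 ≤ j) (hj : j < (row.length : Int))
    (h1 : PySem.List.pyGetD row j 0 = (PySem.List.min? row (fun x => x)).getD 0) :
    (PySem.List.max? ((PySem.List.pyRange 0 (matrix.length : Int) 1).map
        (fun i => PySem.List.pyGetD (PySem.List.pyGetD matrix i []) j 0)) (fun x => x)).getD 0 =
    PySem.List.pyGetD ((PySem.List.pyRange 0 (PySem.List.maxD (matrix.map (fun row => (row.length : Int))) (fun x => x) 0) 1).map
      (fun c => PySem.List.maxD ((matrix.filter (fun row => decide (c < (row.length : Int)))).map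
        (fun row => PySem.List.pyGetD row c 0)) (fun x => x) 0)) j 0 := by
  -- row[j] is below every element of row
  have hmin : ∀ x ∈ row, PySem.List.pyGetD row j 0 ≤ x := by
    cases row with
    | nil => simp at hj; omega
    | cons r0 rt =>
      rw [h1, PySem.List.min?_id_cons]
      intro x hx
      exact PySem.List.min?_isMin (PySem.List.min?_id_cons r0 rt) x hx
  -- Pre_ : every row is long enough at column j
  have hall : ∀ row' ∈ matrix, j < (row'.length : Int) := by
    have hjn : j.toNat < row.length := by omega
    have hget : row.getD j.toNat 0 = PySem.List.pyGetD row j 0 := by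
      rw [PySem.List.pyGetD_eq_getElem row 0 h0 hj, List.getD_eq_getElem row 0 hjn]
    have h := hpre row hrow j.toNat hjn (by intro x hx; rw [hget]; exact hmin x hx)
    intro row' hrow'; have := h row' hrow'; omega
  -- j is inside the width
  have hwidth : j < PySem.List.maxD (matrix.map (fun row => (row.length : Int))) (fun x => x) 0 := by
    cases matrix with
    | nil => simp at hrow
    | cons m0 mt =>
      have hw := PySem.List.max?_id_cons ((m0.length : Int)) (mt.map (fun row => (row.length : Int)))
      have hle : (row.length : Int) ≤ (mt.map (fun row => (row.length : Int))).foldl max (m0.length : Int) :=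
        PySem.List.max?_isMax hw _ (by simpa using List.mem_map_of_mem hrow)
      simp only [List.map_cons, PySem.List.maxD, hw, Option.getD_some]
      omega
  rw [PySem.List.pyGetD_map_pyRange_of_nonneg _ _ j 0 h0 hwidth]
  -- the filter keeps every row
  have hfil : matrix.filter (fun row => decide (j < (row.length : Int))) = matrix :=
    List.filter_eq_self.mpr (fun r hr => decide_eq_true (hall r hr))
  rw [hfil]
  -- A's generator over row indices is the plain map over the rows
  have hmapA : (PySem.List.pyRange 0 (matrix.length : Int) 1).map
      (fun i => PySem.List.pyGetD (PySem.List.pyGetD matrix i []) j 0) =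
      matrix.map (fun r => PySem.List.pyGetD r j 0) := by
    rw [show (fun i => PySem.List.pyGetD (PySem.List.pyGetD matrix i []) j 0) =
        (fun r => PySem.List.pyGetD r j 0) ∘ (fun i => PySem.List.pyGetD matrix i ([] : List Int)) from rfl,
      ← List.map_map, PySem.List.map_pyGetD_pyRange_zero' matrix ([] : List Int)]
  rw [hmapA, PySem.List.maxD]

theorem pv_main (matrix : List (List Int)) (hpre : Pre_specialValues matrix) :
    specialValues matrix = specialValues_alt matrix := by
  unfold specialValues specialValues_alt
  have hz : matrix.zip (matrix.map (fun row => PySem.List.minD row (fun x => x) 0)) =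
      matrix.map (fun r => (r, PySem.List.minD r (fun x => x) 0)) := by
    simpa using (List.zip_map' (f := id) (g := fun row => PySem.List.minD row (fun x => x) 0) (l := matrix))
  simp only [PySem.List.foldl_append_ite, PySem.List.foldl_append_eq_flatMap, List.nil_append]
  rw [hz, List.flatMap_def, List.flatMap_def, List.map_map]
  refine congrArg List.flatten (List.map_congr_left ?_)
  intro row hrow
  simp only [Function.comp]
  rw [pv_flatMap_ite_singleton, PySem.List.enumerate_eq_map_pyRange row 0, List.filter_map,
    List.map_map]
  refine congrArg _ (List.filter_congr ?_)
  intro j hjmem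
  obtain ⟨h0, hj⟩ := PySem.List.mem_pyRange_one.mp hjmem
  simp only [Function.comp]
  rw [decide_eq_decide]
  constructor
  · rintro ⟨ha, hb⟩
    refine ⟨by rw [PySem.List.minD]; exact ha, ?_⟩
    rw [hb]
    exact pv_row matrix hpre row hrow j h0 hj ha
  · rintro ⟨ha, hb⟩
    have ha' : PySem.List.pyGetD row j 0 = (PySem.List.min? row (fun x => x)).getD 0 := by
      rw [← PySem.List.minD]; exact ha
    refine ⟨ha', ?_⟩
    rw [hb]
    exact (pv_row matrix hpre row hrow j h0 hj ha').symm

-- ===== VERDICT (by name: the statement is the Claim_ definition above) =====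
theorem specialValues_spec : Claim_equal_specialValues := by
  intro matrix _ hpre
  exact pv_main matrix hpre
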